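-- pv_equiv track=rewrite | github.com/cajopa/adventofcode | 2017/day12.py | find_all_connected
-- ===== SOURCE A (Python) =====
-- def find_all_connected(parents, visited, connections):
--     children = set()
--
--     parents_to_check = parents - visited
--
--     for parent in parents_to_check:
--         children |= connections[parent]
--         visited.add(parent)
--
--     if children == parents:
--         return children
--     else:
--         return children | find_all_connected(children, visited, connections)
-- ===== SOURCE B (Python) =====
-- def find_all_connected(parents, visited, connections):
--     # Pass 1: one-node-at-a-time BFS over an explicit worklist, recording the
--     # processing order; pass 2: union the neighbour sets of the processed nodes.
--     queue = [p for p in parents if p not in visited]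
--     order = []
--     i = 0
--     while i < len(queue):
--         node = queue[i]
--         i += 1
--         if node not in visited:
--             visited.add(node)
--             order.append(node)
--             queue.extend(connections[node])
--     result = set()
--     for node in order:
--         result |= connections[node]
--     return result
-- ===== Notes on version B (the rewrite author's own statement) =====
-- stated objective: alternative
-- what changed: Replaces A's level-by-level recursion (a fresh children set per level, a union of the whole accumulated result on the way back up, and a children==parents stop test) by two staged passes: an iterative one-node-at-a-time worklist BFS with an index cursor that records the processing order, then a single fold unioning the neighbour lists of the processed nodes.
-- outside the precondition, e.g. on find_all_connected(set(), set(), {1: {2}}): A returns set(), B returns set()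
import Mathlib
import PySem

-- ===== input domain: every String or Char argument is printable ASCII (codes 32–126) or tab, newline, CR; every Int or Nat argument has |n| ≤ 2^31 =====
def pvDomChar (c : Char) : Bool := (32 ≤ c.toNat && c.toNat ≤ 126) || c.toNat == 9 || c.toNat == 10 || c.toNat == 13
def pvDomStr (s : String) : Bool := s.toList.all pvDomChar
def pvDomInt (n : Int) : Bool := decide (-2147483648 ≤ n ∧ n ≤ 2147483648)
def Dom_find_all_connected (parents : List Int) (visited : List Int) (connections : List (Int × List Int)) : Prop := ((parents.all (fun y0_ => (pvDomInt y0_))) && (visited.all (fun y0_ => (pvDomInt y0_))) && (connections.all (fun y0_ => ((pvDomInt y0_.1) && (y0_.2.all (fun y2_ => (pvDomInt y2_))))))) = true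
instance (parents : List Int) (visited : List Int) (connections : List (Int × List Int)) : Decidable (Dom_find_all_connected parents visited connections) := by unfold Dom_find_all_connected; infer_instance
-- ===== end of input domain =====

-- B replaces A's level-by-level recursion (a fresh children set per level, a union of the whole
-- accumulated result on the way back up, and a children==parents stop test) by two staged passes:
-- an iterative one-node-at-a-time worklist BFS recording the processing order, then one fold
-- unioning the neighbour lists of the processed nodes.
-- A mutates its `visited` argument in place; B performs the same mutation; the equivalence
-- proved here is about the RETURN value only.
-- Both ports carry a fuel parameter as a pure totality guard (the Python recursion/loop always
-- terminates); the fuel bounds are proved sufficient in the lemmas below the claim block.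

-- ===== PORT A =====
-- fuel: strictly more than the recursion depth can ever be (proved below)
def pvGasA (parents : List Int) (connections : List (Int × List Int)) : Nat :=
  2 * (connections.flatMap (fun kv => kv.2)).length + 2 * parents.length + 2

-- `connections[parent]` raises KeyError on a missing key: ported as getD with default [],
-- those inputs are excluded by Pre_find_all_connected.
def pvGoA : Nat → List Int → List Int → List (Int × List Int) → List Int
  | 0, _, _, _ => []
  | Nat.succ n, parents, visited, connections =>
      let parents_to_check := PySem.Set.diff parents visited
      let st := parents_to_check.foldl
        (fun (st : PySem.Set Int × PySem.Set Int) parent =>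
          (PySem.Set.union st.1 ((PySem.Dict.mk connections).getD parent []),
           PySem.Set.add st.2 parent)) (PySem.Set.empty, visited)
      if PySem.Set.equal st.1 parents then st.1
      else PySem.Set.union st.1 (pvGoA n st.1 st.2 connections)

def find_all_connected (parents : List Int) (visited : List Int) (connections : List (Int × List Int)) : List Int :=
  pvGoA (pvGasA parents connections) parents visited connections

-- ===== PORT B =====
-- connections[node] (KeyError excluded by Pre_, as in port A)
def pvGetC (connections : List (Int × List Int)) (u : Int) : List Int :=
  (PySem.Dict.mk connections).getD u []

def pvFlatLen (connections : List (Int × List Int)) : Nat :=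
  (connections.flatMap (fun kv => kv.2)).length

-- fuel: strictly more than the number of loop iterations (one per queue entry; proved below)
def pvGasB (q : List Int) (connections : List (Int × List Int)) : Nat :=
  q.length + (pvFlatLen connections + 1) * (pvFlatLen connections + q.length) + 1

-- pass 1: the `while i < len(queue)` loop — the queue suffix not yet reached is the argument
def pvGoB : Nat → List Int → List Int → List Int → List (Int × List Int) → List Int
  | 0, _, _, order, _ => order
  | _ + 1, [], _, order, _ => order
  | n + 1, node :: rest, visited, order, connections =>
      if PySem.Set.contains visited node then pvGoB n rest visited order connections
      else pvGoB n (rest ++ pvGetC connections node) (PySem.Set.add visited node)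
             (order ++ [node]) connections

-- pass 2: `for node in order: result |= connections[node]`
def pvChl (connections : List (Int × List Int)) (result : List Int) (order : List Int) : List Int :=
  order.foldl (fun r node => PySem.Set.union r (pvGetC connections node)) result

def find_all_connected_alt (parents : List Int) (visited : List Int) (connections : List (Int × List Int)) : List Int :=
  let queue := parents.filter (fun p => !(PySem.Set.contains visited p))
  pvChl connections PySem.Set.empty
    (pvGoB (pvGasB queue connections) queue visited [] connections)

-- ===== PRECONDITION & SPEC =====
-- parents encodes a Python set, so its list holds distinct elements (the type convention's set
-- encoding; no actual Python input is excluded by this conjunct). The two membership conditions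
-- exclude exactly the KeyError risk: every non-visited parent and every listed neighbour not
-- already visited must be a key of connections (conservative: it also excludes some inputs whose
-- missing entries A happens never to reach, on which both programs still agree).
def Pre_find_all_connected (parents : List Int) (visited : List Int) (connections : List (Int × List Int)) : Prop :=
  parents.Nodup ∧
  (∀ x ∈ parents, x ∉ visited → x ∈ connections.map Prod.fst) ∧
  (∀ kv ∈ connections, ∀ y ∈ kv.2, y ∈ visited ∨ y ∈ connections.map Prod.fst)
instance (parents : List Int) (visited : List Int) (connections : List (Int × List Int)) : Decidable (Pre_find_all_connected parents visited connections) := by unfold Pre_find_all_connected; infer_instance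

def pvWitness_find_all_connected : List Int × List Int × (List (Int × List Int)) :=
  ([1], [], [(1, [2]), (2, [1])])

def Spec_find_all_connected (parents : List Int) (visited : List Int) (connections : List (Int × List Int)) (out : List Int) : Prop := out = find_all_connected_alt parents visited connections
instance (parents : List Int) (visited : List Int) (connections : List (Int × List Int)) (out : List Int) : Decidable (Spec_find_all_connected parents visited connections out) := by unfold Spec_find_all_connected; infer_instance

-- ===== CLAIM (what is proved, stated in full; the proofs are below) =====
def Claim_equal_find_all_connected : Prop := ∀ (parents : List Int) (visited : List Int) (connections : List (Int × List Int)), Dom_find_all_connected parents visited connections → Pre_find_all_connected parents visited connections → Spec_find_all_connected parents visited connections (find_all_connected parents visited connections)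

-- ===== LEMMAS AND PROOFS =====

-- all node values mentioned in the connection lists
def pvU (connections : List (Int × List Int)) : Finset Int :=
  (connections.flatMap (fun kv => kv.2)).toFinset

lemma mem_pvU_of_mem_getC {connections : List (Int × List Int)} {p y : Int}
    (h : y ∈ pvGetC connections p) : y ∈ pvU connections := by
  simp only [pvGetC, PySem.Dict.getD, PySem.Dict.get?] at h
  cases hf : List.find? (fun q => q.1 == p) (PySem.Dict.mk connections).items with
  | none => rw [hf] at h; simp at h
  | some kv =>
    rw [hf] at h
    simp only [Option.map_some, Option.getD_some] at h
    have hmem : kv ∈ connections := List.mem_of_find?_eq_some hf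
    simp only [pvU, List.mem_toFinset, List.mem_flatMap]
    exact ⟨kv, hmem, h⟩

lemma pvGetC_len_le (connections : List (Int × List Int)) (u : Int) :
    (pvGetC connections u).length ≤ pvFlatLen connections := by
  simp only [pvGetC, PySem.Dict.getD, PySem.Dict.get?]
  cases hf : List.find? (fun q => q.1 == u) (PySem.Dict.mk connections).items with
  | none => simp [pvFlatLen]
  | some kv =>
    simp only [Option.map_some, Option.getD_some]
    have hmem : kv ∈ connections := List.mem_of_find?_eq_some hf
    obtain ⟨l1, l2, rfl⟩ := List.append_of_mem hmem
    simp [pvFlatLen, List.flatMap_append]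
    omega

-- the fold in A's loop splits into the children component and the visited component
lemma pvFoldSplit (connections : List (Int × List Int)) (l : List Int) (c v : List Int) :
    l.foldl
      (fun (st : PySem.Set Int × PySem.Set Int) parent =>
        (PySem.Set.union st.1 ((PySem.Dict.mk connections).getD parent []),
         PySem.Set.add st.2 parent)) (c, v)
    = (pvChl connections c l, PySem.Set.update v l) := by
  induction l generalizing c v with
  | nil => simp [pvChl, PySem.Set.update]
  | cons x xs ih => simp [pvChl, pvGetC, PySem.Set.update, List.foldl_cons] at *; exact ih _ _

lemma pvChl_update (connections : List (Int × List Int)) :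
    ∀ (l c : List Int), pvChl connections c l = PySem.Set.update c (l.flatMap (pvGetC connections)) := by
  intro l
  induction l with
  | nil => intro c; simp [pvChl, PySem.Set.update_nil]
  | cons u l ih =>
    intro c
    show pvChl connections (PySem.Set.union c (pvGetC connections u)) l = _
    rw [ih]
    show PySem.Set.update (PySem.Set.update c (pvGetC connections u)) _ = _
    rw [← PySem.Set.update_append]
    simp

lemma mem_pvChl {connections : List (Int × List Int)} {c l : List Int} {y : Int} :
    y ∈ pvChl connections c l ↔ y ∈ c ∨ ∃ p ∈ l, y ∈ pvGetC connections p := by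
  rw [pvChl_update, PySem.Set.mem_update, List.mem_flatMap]

lemma pvUpdate_ofList (a : List Int) (l : List Int) :
    PySem.Set.update a (PySem.Set.ofList l) = PySem.Set.update a l := by
  rw [PySem.Set.update_eq_append_filter, PySem.Set.update_eq_append_filter a l,
    PySem.Set.ofList_ofList]

lemma pvOfList_flat (connections : List (Int × List Int)) (l : List Int) :
    PySem.Set.ofList (l.flatMap (pvGetC connections)) = pvChl connections PySem.Set.empty l := by
  rw [pvChl_update, ← PySem.Set.update_nil_left]
  rfl

lemma nodup_pvChl_empty (connections : List (Int × List Int)) (l : List Int) :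
    (pvChl connections PySem.Set.empty l).Nodup := by
  rw [← pvOfList_flat]
  exact PySem.Set.nodup_ofList _

-- ---- the level filter: first occurrences of a queue segment not yet visited ----
def pvLf : List Int → List Int → List Int
  | _, [] => []
  | V, u :: q => if u ∈ V then pvLf V q else u :: pvLf (PySem.Set.add V u) q

lemma pvLf_congr : ∀ (l V W : List Int), (∀ y : Int, y ∈ V ↔ y ∈ W) → pvLf V l = pvLf W l := by
  intro l
  induction l with
  | nil => intro V W _; rfl
  | cons u q ih =>
    intro V W h
    simp only [pvLf]
    by_cases hm : u ∈ V
    · rw [if_pos hm, if_pos ((h u).mp hm)]; exact ih V W h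
    · rw [if_neg hm, if_neg (fun hw => hm ((h u).mpr hw))]
      congr 1
      refine ih _ _ (fun y => ?_)
      rw [PySem.Set.mem_add, PySem.Set.mem_add, h y]

lemma pvLf_add_not_mem : ∀ (l V : List Int) (x : Int), x ∉ l → pvLf (PySem.Set.add V x) l = pvLf V l := by
  intro l
  induction l with
  | nil => intro V x _; rfl
  | cons u q ih =>
    intro V x hx
    have hne : u ≠ x := fun h => hx (h ▸ List.mem_cons_self)
    have hxq : x ∉ q := fun h => hx (List.mem_cons_of_mem _ h)
    simp only [pvLf]
    by_cases hm : u ∈ V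
    · rw [if_pos (by rw [PySem.Set.mem_add]; exact Or.inl hm), if_pos hm]
      exact ih V x hxq
    · rw [if_neg (by rw [PySem.Set.mem_add]; rintro (h | h); exact hm h; exact hne h),
        if_neg hm]
      congr 1
      calc pvLf (PySem.Set.add (PySem.Set.add V x) u) q
          = pvLf (PySem.Set.add (PySem.Set.add V u) x) q := by
            refine pvLf_congr _ _ _ (fun y => ?_)
            simp only [PySem.Set.mem_add]
            tauto
        _ = pvLf (PySem.Set.add V u) q := ih _ x hxq

lemma pvLf_eq_self : ∀ (l V : List Int), l.Nodup → (∀ x ∈ l, x ∉ V) → pvLf V l = l := by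
  intro l
  induction l with
  | nil => intro V _ _; rfl
  | cons u q ih =>
    intro V hnd hdisj
    simp only [pvLf, if_neg (hdisj u List.mem_cons_self)]
    rw [pvLf_add_not_mem q V u (List.nodup_cons.mp hnd).1]
    rw [ih V (List.nodup_cons.mp hnd).2 (fun x hx => hdisj x (List.mem_cons_of_mem _ hx))]

lemma pvLf_diff : ∀ (l c W V : List Int), (∀ x : Int, x ∈ W ↔ x ∈ V ∨ x ∈ c) →
    PySem.Set.diff (PySem.Set.update c l) V = PySem.Set.diff c V ++ pvLf W l := by
  intro l
  induction l with
  | nil => intro c W V _; simp [PySem.Set.update_nil, pvLf]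
  | cons u q ih =>
    intro c W V hW
    rw [PySem.Set.update_cons]
    by_cases hc : u ∈ c
    · rw [PySem.Set.add_of_mem hc]
      simp only [pvLf, if_pos ((hW u).mpr (Or.inr hc))]
      exact ih c W V hW
    · rw [PySem.Set.add_of_not_mem hc]
      by_cases hv : u ∈ V
      · simp only [pvLf, if_pos ((hW u).mpr (Or.inl hv))]
        rw [ih (c ++ [u]) W V (fun x => by
          rw [hW x]
          simp only [List.mem_append, List.mem_singleton]
          constructor
          · rintro (h | h)
            · exact Or.inl h
            · exact Or.inr (Or.inl h)
          · rintro (h | h | h)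
            · exact Or.inl h
            · exact Or.inr h
            · subst h; exact Or.inl hv)]
        show List.filter _ (c ++ [u]) ++ _ = _
        rw [List.filter_append]
        have : List.filter (fun x => !(PySem.Set.contains V x)) [u] = [] := by
          simp [PySem.Set.contains_eq_listContains, List.contains_eq_mem, hv]
        rw [this, List.append_nil]
        rfl
      · simp only [pvLf, if_neg (fun h => (hW u).mp h |>.elim hv hc)]
        rw [ih (c ++ [u]) (PySem.Set.add W u) V (fun x => by
          rw [PySem.Set.mem_add, hW x]
          simp only [List.mem_append, List.mem_singleton]
          tauto)]
        show List.filter _ (c ++ [u]) ++ _ = List.filter _ c ++ _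
        rw [List.filter_append]
        have : List.filter (fun x => !(PySem.Set.contains V x)) [u] = [u] := by
          simp [PySem.Set.contains_eq_listContains, List.contains_eq_mem, hv]
        rw [this, List.append_assoc]
        rfl

lemma pvLf_eq_diff (l V : List Int) :
    pvLf V l = PySem.Set.diff (PySem.Set.ofList l) V := by
  have h := pvLf_diff l [] V V (fun x => by simp)
  rw [PySem.Set.update_nil_left] at h
  have h0 : PySem.Set.diff ([] : List Int) V = [] := rfl
  rw [h0] at h
  simpa using h.symm

-- ---- the loop measure for B: one unit per queue entry, a block per still-discoverable node ----
def pvMu (connections : List (Int × List Int)) (q V : List Int) : Nat :=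
  q.length + (pvFlatLen connections + 1) * (((pvU connections) ∪ q.toFinset) \ V.toFinset).card

lemma pvMu_step_visited (connections : List (Int × List Int)) (u : Int) (q V : List Int) :
    pvMu connections q V < pvMu connections (u :: q) V := by
  have hsub : ((pvU connections) ∪ q.toFinset) \ V.toFinset
      ⊆ ((pvU connections) ∪ (u :: q).toFinset) \ V.toFinset := by
    intro x hx
    simp only [Finset.mem_sdiff, Finset.mem_union, List.toFinset_cons, Finset.mem_insert] at *
    tauto
  have h1 := Finset.card_le_card hsub
  have h2 := Nat.mul_le_mul_left (pvFlatLen connections + 1) h1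
  simp only [pvMu, List.length_cons]
  omega

lemma pvMu_step_new (connections : List (Int × List Int)) (u : Int) (q V : List Int)
    (h : u ∉ V) :
    pvMu connections (q ++ pvGetC connections u) (PySem.Set.add V u) < pvMu connections (u :: q) V := by
  rw [PySem.Set.add_of_not_mem h]
  have hVfin : (V ++ [u]).toFinset = insert u V.toFinset := by
    simp [List.toFinset_append]
  have hsub : ((pvU connections) ∪ (q ++ pvGetC connections u).toFinset) \ (V ++ [u]).toFinset
      ⊆ (((pvU connections) ∪ (u :: q).toFinset) \ V.toFinset).erase u := by
    intro x hx
    rw [hVfin] at hx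
    simp only [Finset.mem_sdiff, Finset.mem_union, Finset.mem_insert, Finset.mem_erase,
      List.toFinset_append, List.toFinset_cons, List.mem_toFinset, not_or] at *
    obtain ⟨h1, h2, h3⟩ := hx
    refine ⟨h2, ?_, h3⟩
    rcases h1 with h1 | h1 | h1
    · exact Or.inl h1
    · exact Or.inr (Or.inr h1)
    · exact Or.inl (by simpa using mem_pvU_of_mem_getC h1)
  have hu : u ∈ ((pvU connections) ∪ (u :: q).toFinset) \ V.toFinset := by
    rw [Finset.mem_sdiff]
    refine ⟨Finset.mem_union_right _ ?_, by simpa using h⟩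
    simp
  have hcard := Finset.card_le_card hsub
  rw [Finset.card_erase_of_mem hu] at hcard
  have hpos : 1 ≤ (((pvU connections) ∪ (u :: q).toFinset) \ V.toFinset).card :=
    Finset.card_pos.mpr ⟨u, hu⟩
  have hlen : (q ++ pvGetC connections u).length ≤ q.length + pvFlatLen connections := by
    have := pvGetC_len_le connections u
    simp [List.length_append]
    omega
  have hmul : (pvFlatLen connections + 1) *
      ((((pvU connections) ∪ (q ++ pvGetC connections u).toFinset) \ (V ++ [u]).toFinset).card + 1)
      ≤ (pvFlatLen connections + 1) * (((pvU connections) ∪ (u :: q).toFinset) \ V.toFinset).card :=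
    Nat.mul_le_mul_left _ (by omega)
  rw [Nat.mul_add, Nat.mul_one] at hmul
  simp only [pvMu, List.length_cons]
  omega

lemma pvMu_lt_gasB (connections : List (Int × List Int)) (q V : List Int) :
    pvMu connections q V < pvGasB q connections := by
  have h1 : (((pvU connections) ∪ q.toFinset) \ V.toFinset).card
      ≤ pvFlatLen connections + q.length := by
    calc (((pvU connections) ∪ q.toFinset) \ V.toFinset).card
        ≤ ((pvU connections) ∪ q.toFinset).card := Finset.card_le_card Finset.sdiff_subset
      _ ≤ (pvU connections).card + q.toFinset.card := Finset.card_union_le _ _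
      _ ≤ pvFlatLen connections + q.length :=
          Nat.add_le_add (List.toFinset_card_le _) (List.toFinset_card_le _)
  have h2 := Nat.mul_le_mul_left (pvFlatLen connections + 1) h1
  simp only [pvMu, pvGasB]
  omega

lemma pvGoB_nil (n : Nat) (V O : List Int) (connections : List (Int × List Int)) :
    pvGoB n [] V O connections = O := by
  cases n <;> rfl

lemma pvGoB_irrel (connections : List (Int × List Int)) :
    ∀ (n n' : Nat) (q V O : List Int), pvMu connections q V < n → pvMu connections q V < n' →
      pvGoB n q V O connections = pvGoB n' q V O connections := by
  intro n
  induction n with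
  | zero => intro n' q V O h _; omega
  | succ m ih =>
    intro n' q V O h h'
    match q with
    | [] => rw [pvGoB_nil, pvGoB_nil]
    | u :: rest =>
      have h1 : 1 ≤ pvMu connections (u :: rest) V := by
        simp only [pvMu, List.length_cons]; omega
      obtain ⟨k, rfl⟩ : ∃ k, n' = k + 1 := ⟨n' - 1, by omega⟩
      by_cases hc : PySem.Set.contains V u = true
      · simp only [pvGoB, hc, if_true]
        exact ih k rest V O (by have := pvMu_step_visited connections u rest V; omega)
          (by have := pvMu_step_visited connections u rest V; omega)
      · simp only [pvGoB, hc, Bool.false_eq_true, if_false]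
        have hm : u ∉ V := fun hmem => hc ((PySem.Set.contains_iff V u).mpr hmem)
        have hstep := pvMu_step_new connections u rest V hm
        exact ih k _ _ _ (by omega) (by omega)

lemma pvGoB_acc (connections : List (Int × List Int)) :
    ∀ (n : Nat) (q V O : List Int),
      pvGoB n q V O connections = O ++ pvGoB n q V [] connections := by
  intro n
  induction n with
  | zero => intro q V O; simp [pvGoB]
  | succ m ih =>
    intro q V O
    match q with
    | [] => simp [pvGoB]
    | u :: rest =>
      by_cases hc : PySem.Set.contains V u = true
      · simp only [pvGoB, hc, if_true]
        exact ih rest V O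
      · simp only [pvGoB, hc, Bool.false_eq_true, if_false]
        rw [ih _ _ (O ++ [u]), ih _ _ ([] ++ [u])]
        simp

lemma pvGoB_level (connections : List (Int × List Int)) :
    ∀ (C R V O : List Int) (n : Nat),
      pvGoB (C.length + n) (C ++ R) V O connections
        = pvGoB n (R ++ (pvLf V C).flatMap (pvGetC connections))
            (PySem.Set.update V (pvLf V C)) (O ++ pvLf V C) connections := by
  intro C
  induction C with
  | nil => intro R V O n; simp [pvLf, PySem.Set.update_nil]
  | cons u C ih =>
    intro R V O n
    have hfuel : (u :: C).length + n = (C.length + n) + 1 := by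
      simp [List.length_cons]; omega
    rw [hfuel]
    by_cases hm : u ∈ V
    · have hc : PySem.Set.contains V u = true := (PySem.Set.contains_iff V u).mpr hm
      simp only [pvGoB, List.cons_append, hc, if_true]
      rw [ih R V O n]
      simp only [pvLf, if_pos hm]
    · have hc : ¬ (PySem.Set.contains V u = true) := fun h => hm ((PySem.Set.contains_iff V u).mp h)
      simp only [pvGoB, List.cons_append, hc, Bool.false_eq_true, if_false]
      rw [List.append_assoc]
      rw [ih (R ++ pvGetC connections u) (PySem.Set.add V u) (O ++ [u]) n]
      simp only [pvLf, if_neg hm]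
      rw [PySem.Set.update_cons]
      simp [List.append_assoc]

lemma pvGoB_lf (connections : List (Int × List Int)) :
    ∀ (q r V O : List Int) (n n' : Nat),
      pvMu connections (q ++ r) V < n → pvMu connections (pvLf V q ++ r) V < n' →
      pvGoB n (q ++ r) V O connections = pvGoB n' (pvLf V q ++ r) V O connections := by
  intro q
  induction q with
  | nil =>
    intro r V O n n' h h'
    simp only [pvLf, List.nil_append] at *
    exact pvGoB_irrel connections n n' r V O h h'
  | cons u q ih =>
    intro r V O n n' h h'
    have h1 : 1 ≤ pvMu connections ((u :: q) ++ r) V := by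
      simp only [pvMu, List.length_cons, List.length_append]; omega
    obtain ⟨m, rfl⟩ : ∃ m, n = m + 1 := ⟨n - 1, by omega⟩
    by_cases hm : u ∈ V
    · have hc : PySem.Set.contains V u = true := (PySem.Set.contains_iff V u).mpr hm
      simp only [List.cons_append, pvGoB, hc, if_true]
      have hstep := pvMu_step_visited connections u (q ++ r) V
      rw [ih r V O m n' (by simp only [List.cons_append] at h; omega)
        (by simp only [pvLf, if_pos hm] at h'; exact h')]
      simp only [pvLf, if_pos hm]
    · have hc : ¬ (PySem.Set.contains V u = true) := fun hcc => hm ((PySem.Set.contains_iff V u).mp hcc)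
      have hlf : pvLf V (u :: q) = u :: pvLf (PySem.Set.add V u) q := by
        simp only [pvLf, if_neg hm]
      rw [hlf] at h' ⊢
      have h2 : 1 ≤ pvMu connections ((u :: pvLf (PySem.Set.add V u) q) ++ r) V := by
        simp only [pvMu, List.length_cons, List.length_append]; omega
      obtain ⟨k, rfl⟩ : ∃ k, n' = k + 1 := ⟨n' - 1, by omega⟩
      simp only [List.cons_append, pvGoB, hc, Bool.false_eq_true, if_false]
      have hstepL := pvMu_step_new connections u (q ++ r) V hm
      have hstepR := pvMu_step_new connections u (pvLf (PySem.Set.add V u) q ++ r) V hm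
      rw [List.append_assoc, List.append_assoc]
      exact ih (r ++ pvGetC connections u) (PySem.Set.add V u) (O ++ [u]) m k
        (by rw [← List.append_assoc]; simp only [List.cons_append] at h; omega)
        (by rw [← List.append_assoc]; simp only [List.cons_append] at h'; omega)

-- ---- A-side recursion-depth measure (unchanged from the A port's own shape) ----
def pvMeasA (parents visited : List Int) (connections : List (Int × List Int)) : Nat :=
  2 * ((pvU connections) \ visited.toFinset).card
  + 2 * ((parents.toFinset \ visited.toFinset) \ pvU connections).card
  + (if parents = [] then 0 else 1)

lemma pvMeasA_lt (parents visited : List Int) (connections : List (Int × List Int))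
    (h : ¬ PySem.Set.equal (pvChl connections PySem.Set.empty (PySem.Set.diff parents visited)) parents = true) :
    pvMeasA (pvChl connections PySem.Set.empty (PySem.Set.diff parents visited))
      (PySem.Set.update visited (PySem.Set.diff parents visited)) connections
    < pvMeasA parents visited connections := by
  set F := PySem.Set.diff parents visited with hF
  set C := pvChl connections PySem.Set.empty F with hC
  set V' := PySem.Set.update visited F with hV'
  have hCU : ∀ y ∈ C, y ∈ pvU connections := by
    intro y hy
    rcases mem_pvChl.mp hy with hy | ⟨p, _, hy⟩
    · simp [PySem.Set.empty] at hy
    · exact mem_pvU_of_mem_getC hy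
  have hmemV' : ∀ y, y ∈ V' ↔ y ∈ visited ∨ y ∈ F := by
    intro y; rw [hV']; exact PySem.Set.mem_update _ _ _
  have hmemF : ∀ y, y ∈ F ↔ y ∈ parents ∧ y ∉ visited := by
    intro y; rw [hF]; exact PySem.Set.mem_diff _ _ _
  have hsnd : ((C.toFinset \ V'.toFinset) \ pvU connections).card = 0 := by
    rw [Finset.card_eq_zero]
    ext y
    simp only [Finset.mem_sdiff, List.mem_toFinset, Finset.notMem_empty, iff_false]
    rintro ⟨⟨hyC, _⟩, hyU⟩
    exact hyU (hCU y hyC)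
  have hsub : pvU connections \ V'.toFinset ⊆ pvU connections \ visited.toFinset := by
    intro y hy
    simp only [Finset.mem_sdiff, List.mem_toFinset] at *
    exact ⟨hy.1, fun hv => hy.2 ((hmemV' y).mpr (Or.inl hv))⟩
  have hfirst_le : (pvU connections \ V'.toFinset).card ≤ (pvU connections \ visited.toFinset).card :=
    Finset.card_le_card hsub
  by_cases h1 : ∃ x, x ∈ parents ∧ x ∉ visited ∧ x ∈ pvU connections
  · -- a fresh parent is a known node: the first component strictly drops
    obtain ⟨x, hxp, hxv, hxU⟩ := h1
    have hne : parents ≠ [] := by intro hnil; rw [hnil] at hxp; simp at hxp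
    have hlt : (pvU connections \ V'.toFinset).card < (pvU connections \ visited.toFinset).card := by
      apply Finset.card_lt_card
      constructor
      · exact hsub
      · intro hsub2
        have hx1 : x ∈ pvU connections \ visited.toFinset := by
          simp [Finset.mem_sdiff, List.mem_toFinset, hxU, hxv]
        have := hsub2 hx1
        simp only [Finset.mem_sdiff, List.mem_toFinset] at this
        exact this.2 ((hmemV' x).mpr (Or.inr ((hmemF x).mpr ⟨hxp, hxv⟩)))
    simp only [pvMeasA, hsnd, if_neg hne]
    have hb' : (if C = [] then 0 else 1) ≤ 1 := by split <;> omega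
    omega
  · by_cases h2 : ∃ x, x ∈ parents ∧ x ∉ visited
    · -- a fresh parent outside pvU: the old second component is positive
      obtain ⟨x, hxp, hxv⟩ := h2
      have hxU : x ∉ pvU connections := fun hU => h1 ⟨x, hxp, hxv, hU⟩
      have hne : parents ≠ [] := by intro hnil; rw [hnil] at hxp; simp at hxp
      have hpos : 0 < ((parents.toFinset \ visited.toFinset) \ pvU connections).card := by
        apply Finset.card_pos.mpr
        exact ⟨x, by simp [Finset.mem_sdiff, List.mem_toFinset, hxp, hxv, hxU]⟩
      simp only [pvMeasA, hsnd, if_neg hne]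
      have hb' : (if C = [] then 0 else 1) ≤ 1 := by split <;> omega
      omega
    · -- no fresh parent: F = [], children = [], parents ≠ []
      have hFnil : F = [] := by
        rw [hF]
        simp only [PySem.Set.diff]
        rw [List.filter_eq_nil_iff]
        intro x hx
        simp only [Bool.not_eq_eq_eq_not, Bool.not_true, PySem.Set.contains_eq_listContains]
        by_contra hcon
        exact h2 ⟨x, hx, by simpa using hcon⟩
      have hCnil : C = [] := by rw [hC, hFnil]; rfl
      have hV'eq : V' = visited := by rw [hV', hFnil]; rfl
      have hne : parents ≠ [] := by
        intro hnil
        apply h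
        rw [hCnil, hnil]
        rfl
      simp only [pvMeasA, hCnil, hV'eq, if_neg hne]
      simp

lemma pvMeasA_lt_gas (parents visited : List Int) (connections : List (Int × List Int)) :
    pvMeasA parents visited connections < pvGasA parents connections := by
  have h1 : ((pvU connections) \ visited.toFinset).card ≤ (connections.flatMap (fun kv => kv.2)).length := by
    calc ((pvU connections) \ visited.toFinset).card ≤ (pvU connections).card :=
          Finset.card_le_card (Finset.sdiff_subset)
      _ ≤ _ := List.toFinset_card_le _
  have h2 : ((parents.toFinset \ visited.toFinset) \ pvU connections).card ≤ parents.length := by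
    calc ((parents.toFinset \ visited.toFinset) \ pvU connections).card
        ≤ (parents.toFinset \ visited.toFinset).card := Finset.card_le_card (Finset.sdiff_subset)
      _ ≤ parents.toFinset.card := Finset.card_le_card (Finset.sdiff_subset)
      _ ≤ parents.length := List.toFinset_card_le _
  have h3 : (if parents = [] then 0 else 1) ≤ 1 := by split <;> omega
  simp only [pvMeasA, pvGasA]
  omega

lemma pvNodup_pvGoA (n : Nat) (parents visited : List Int) (connections : List (Int × List Int)) :
    (pvGoA n parents visited connections).Nodup := by
  induction n generalizing parents visited with
  | zero => exact List.nodup_nil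
  | succ m ih =>
    rw [pvGoA]
    simp only [pvFoldSplit]
    split
    · exact nodup_pvChl_empty connections _
    · exact PySem.Set.nodup_union _ _ (nodup_pvChl_empty connections _)

lemma pvUnion_eq_update (s t : List Int) : PySem.Set.union s t = PySem.Set.update s t := rfl

-- the main bridge: the worklist loop plus the final union pass computes A's recursion
lemma pvMain (connections : List (Int × List Int)) :
    ∀ (nA : Nat) (P l V acc : List Int) (nB : Nat),
      P.Nodup → pvLf V l = PySem.Set.diff P V →
      pvMu connections l V < nB → pvMeasA P V connections < nA →
      pvChl connections acc (pvGoB nB l V [] connections)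
        = PySem.Set.union acc (pvGoA nA P V connections) := by
  intro nA
  induction nA with
  | zero => intro P l V acc nB _ _ _ hA; omega
  | succ n ih =>
    intro P l V acc nB hNd hlf hmB hmA
    have hFnd : (PySem.Set.diff P V).Nodup := PySem.Set.nodup_diff _ _ hNd
    have hFdisj : ∀ x ∈ PySem.Set.diff P V, x ∉ V := fun x hx =>
      ((PySem.Set.mem_diff _ _ _).mp hx).2
    have hlfF : pvLf V (PySem.Set.diff P V) = PySem.Set.diff P V :=
      pvLf_eq_self _ V hFnd hFdisj
    set F := PySem.Set.diff P V with hFdef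
    set V' := PySem.Set.update V F with hV'def
    set C := pvChl connections PySem.Set.empty F with hCdef
    set m := pvMu connections (F.flatMap (pvGetC connections)) V' + pvMu connections F V + 1 with hmdef
    -- B's loop passes through the frontier F, then continues on its children
    have hb1 : pvGoB nB l V [] connections = pvGoB (F.length + m) (F ++ []) V [] connections := by
      have := pvGoB_lf connections l [] V [] nB (F.length + m)
        (by simpa using hmB)
        (by rw [hlf]; simp only [List.append_nil]; omega)
      rw [hlf] at this
      simpa using this
    have hb2 : pvGoB (F.length + m) (F ++ []) V [] connections
        = pvGoB m (F.flatMap (pvGetC connections)) V' F connections := by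
      rw [pvGoB_level connections F [] V [] m, hlfF]
      simp only [List.nil_append]
      rw [← hV'def]
    have hb3 : pvGoB m (F.flatMap (pvGetC connections)) V' F connections
        = F ++ pvGoB m (F.flatMap (pvGetC connections)) V' [] connections :=
      pvGoB_acc connections m _ V' F
    have hofC : PySem.Set.ofList (F.flatMap (pvGetC connections)) = C :=
      pvOfList_flat connections F
    have hlf' : pvLf V' (F.flatMap (pvGetC connections)) = PySem.Set.diff C V' := by
      rw [pvLf_eq_diff, hofC]
    -- A unrolls one level
    rw [hb1, hb2, hb3, pvChl, List.foldl_append, ← pvChl, ← pvChl]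
    rw [pvGoA]
    simp only [pvFoldSplit, ← hFdef, ← hCdef, ← hV'def]
    by_cases hEq : PySem.Set.equal C P = true
    · rw [if_pos hEq]
      -- the frontier of the next level is empty: B's loop stops with order = F
      have hdiff : PySem.Set.diff C V' = [] := by
        rw [List.eq_nil_iff_forall_not_mem]
        intro y hy
        obtain ⟨hyC, hyV⟩ := (PySem.Set.mem_diff _ _ _).mp hy
        have hyp : y ∈ P := ((PySem.Set.equal_iff _ _).mp hEq y).mp hyC
        apply hyV
        by_cases hv : y ∈ V
        · exact (PySem.Set.mem_update _ _ _).mpr (Or.inl hv)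
        · exact (PySem.Set.mem_update _ _ _).mpr
            (Or.inr ((PySem.Set.mem_diff _ _ _).mpr ⟨hyp, hv⟩))
      have hrest : pvGoB m (F.flatMap (pvGetC connections)) V' [] connections = [] := by
        have := pvGoB_lf connections (F.flatMap (pvGetC connections)) [] V' []
          m (pvMu connections [] V' + 1)
          (by simp only [List.append_nil]; omega)
          (by rw [hlf', hdiff]; simp)
        rw [hlf', hdiff] at this
        simpa [pvGoB_nil] using this
      rw [hrest]
      show pvChl connections acc F = PySem.Set.union acc C
      rw [pvChl_update, pvUnion_eq_update, ← hofC, pvUpdate_ofList]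
    · rw [if_neg hEq]
      have hCnd : C.Nodup := nodup_pvChl_empty connections F
      have hmA' : pvMeasA C V' connections < n := by
        have := pvMeasA_lt P V connections (by rw [← hFdef, ← hCdef]; exact hEq)
        rw [← hFdef, ← hCdef, ← hV'def] at this
        omega
      rw [ih C (F.flatMap (pvGetC connections)) V' (pvChl connections acc F) m
        hCnd hlf' (by omega) hmA']
      -- set algebra: acc ∪ (C ∪ X) = (acc ∪ chl(F)) ∪ X
      rw [pvUnion_eq_update, pvUnion_eq_update, pvUnion_eq_update, pvChl_update,
        ← PySem.Set.update_append]
      have hCX : PySem.Set.update C (pvGoA n C V' connections)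
          = PySem.Set.ofList (F.flatMap (pvGetC connections) ++ pvGoA n C V' connections) := by
        rw [← hofC, ← PySem.Set.update_nil_left, ← PySem.Set.update_append,
          PySem.Set.update_nil_left]
      rw [hCX, pvUpdate_ofList]

-- ===== VERDICT (by name: the statement is the Claim_ definition above) =====
theorem find_all_connected_spec : Claim_equal_find_all_connected := by
  intro parents visited connections _dom hpre
  show find_all_connected parents visited connections = find_all_connected_alt parents visited connections
  have hq : parents.filter (fun p => !(PySem.Set.contains visited p))
      = PySem.Set.diff parents visited := rfl
  rw [find_all_connected_alt, find_all_connected]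
  simp only [hq]
  rw [pvMain connections (pvGasA parents connections) parents
    (PySem.Set.diff parents visited) visited PySem.Set.empty
    (pvGasB (PySem.Set.diff parents visited) connections)
    hpre.1
    (pvLf_eq_self _ _ (PySem.Set.nodup_diff _ _ hpre.1)
      (fun x hx => ((PySem.Set.mem_diff _ _ _).mp hx).2))
    (pvMu_lt_gasB connections _ _)
    (pvMeasA_lt_gas parents visited connections)]
  show pvGoA (pvGasA parents connections) parents visited connections
    = PySem.Set.update [] (pvGoA (pvGasA parents connections) parents visited connections)
  rw [PySem.Set.update_nil_left,
    PySem.Set.ofList_eq_self_of_nodup _ (pvNodup_pvGoA _ parents visited connections)]
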